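-- pv_equiv track=rewrite | github.com/FloHofstetter/shoreguard | shoreguard/client/_tls.py | _san_matches
-- ===== SOURCE A (Python) =====
-- def _san_matches(san_dns: tuple[str, ...], host: str) -> bool:
--     """Match a hostname against a DNS SAN list, honoring leading wildcards.
--
--     Args:
--         san_dns: DNS SANs extracted from the certificate, lower-cased.
--         host: Hostname to match.
--
--     Returns:
--         bool: ``True`` when the host is covered by any SAN entry.
--     """
--     host = host.lower()
--     for san in san_dns:
--         if san == host:
--             return True
--         if san.startswith("*.") and host.endswith(san[1:]) and "." in host:
--             # Wildcard matches exactly one label.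
--             host_prefix = host[: -len(san) + 1]
--             if "." not in host_prefix:
--                 return True
--     return False
-- ===== SOURCE B (Python) =====
-- def _san_matches(san_dns: tuple[str, ...], host: str) -> bool:
--     """Match a hostname against a DNS SAN list, honoring leading wildcards."""
--     host = host.lower()
--     dot = host.find(".")
--     # The only SAN entries that can cover `host` are `host` itself and the
--     # single-label wildcard obtained by replacing everything before the
--     # first dot with '*'.
--     candidates = {host} if dot < 0 else {host, "*" + host[dot:]}
--     return not candidates.isdisjoint(san_dns)
-- ===== Notes on version B (the rewrite author's own statement) =====
-- stated objective: idiomatic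
-- what changed: Instead of scanning every SAN entry and running the wildcard-prefix test on each, B derives from the host the only two keys a covering SAN could be (the host itself and '*' + host[first-dot:]) and answers with a single set-disjointness test against san_dns.
import Mathlib
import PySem

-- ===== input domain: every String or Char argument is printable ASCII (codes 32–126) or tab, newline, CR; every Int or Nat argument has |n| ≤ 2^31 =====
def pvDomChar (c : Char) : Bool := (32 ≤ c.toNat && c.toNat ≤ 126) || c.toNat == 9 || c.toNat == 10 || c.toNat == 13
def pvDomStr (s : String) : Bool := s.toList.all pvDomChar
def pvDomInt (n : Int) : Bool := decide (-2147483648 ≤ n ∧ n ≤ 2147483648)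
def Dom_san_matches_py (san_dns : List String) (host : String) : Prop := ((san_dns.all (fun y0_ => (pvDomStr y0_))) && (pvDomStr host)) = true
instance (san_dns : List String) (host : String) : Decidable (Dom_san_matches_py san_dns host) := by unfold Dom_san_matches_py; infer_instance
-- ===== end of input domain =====

-- B replaces A's per-SAN wildcard scan by deriving from the host the only two SAN keys that
-- could cover it and testing set disjointness against san_dns (idiomatic; same result).

-- ===== PORT A =====
-- the for-loop with early returns, over the remaining SAN list
def sanLoopA (host : String) : List String → Bool
  | [] => false
  | san :: rest =>
    if san == host then true
    else if PySem.Str.startswith san "*." && PySem.Str.endswith host (PySem.Str.slice san (some 1) none) && PySem.Str.isIn "." host then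
      -- host_prefix = host[: -len(san) + 1]
      let host_prefix := PySem.Str.slice host none (some (-(PySem.Str.len san) + 1))
      if !(PySem.Str.isIn "." host_prefix) then true else sanLoopA host rest
    else sanLoopA host rest

def san_matches_py (san_dns : List String) (host : String) : Bool :=
  sanLoopA (PySem.Str.lower host) san_dns

-- ===== PORT B =====
def san_matches_py_alt (san_dns : List String) (host : String) : Bool :=
  let host' := PySem.Str.lower host
  let dot := PySem.Str.find host' "."
  let candidates : PySem.Set String :=
    if dot < 0 then PySem.Set.ofList [host']
    else PySem.Set.ofList [host', "*" ++ PySem.Str.slice host' (some dot) none]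
  !(PySem.Set.isdisjoint candidates san_dns)

-- ===== PRECONDITION & SPEC =====
def Spec_san_matches_py (san_dns : List String) (host : String) (out : Bool) : Prop := out = san_matches_py_alt san_dns host
instance (san_dns : List String) (host : String) (out : Bool) : Decidable (Spec_san_matches_py san_dns host out) := by unfold Spec_san_matches_py; infer_instance

-- ===== CLAIM (what is proved, stated in full; the proofs are below) =====
def Claim_equal_san_matches_py : Prop := ∀ (san_dns : List String) (host : String), Dom_san_matches_py san_dns host → Spec_san_matches_py san_dns host (san_matches_py san_dns host)

-- ===== LEMMAS AND PROOFS =====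

-- [c] is a prefix of l.drop i exactly when l[i]? = c
theorem pv_single_prefix_drop (c : Char) (l : List Char) (i : Nat) :
    [c] <+: l.drop i ↔ l[i]? = some c := by
  rw [← List.head?_drop]
  cases l.drop i with
  | nil => simp
  | cons a t =>
    constructor
    · rintro ⟨s, hs⟩; simp at hs; simp [hs.1]
    · intro h; simp at h; exact ⟨t, by simp [h]⟩

-- [c] is an infix of l exactly when c ∈ l
theorem pv_single_infix (c : Char) (l : List Char) : [c] <:+: l ↔ c ∈ l := by
  constructor
  · rintro ⟨s, t, rfl⟩; simp
  · intro h
    obtain ⟨s, t, rfl⟩ := List.append_of_mem h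
    exact ⟨s, t, by simp⟩

-- A's per-entry wildcard test characterised: san is exactly '*' followed by the host from its first dot
theorem pv_wc_iff (h s : List Char) :
    (PySem.Chars.startswith s ['*', '.'] && PySem.Chars.endswith h s.tail
      && PySem.Chars.isIn ['.'] h
      && !(PySem.Chars.isIn ['.'] (PySem.List.slice h none (some (-(s.length : Int) + 1))))) = true
    ↔ (0 ≤ PySem.Chars.find h ['.'] ∧ s = '*' :: h.drop (PySem.Chars.find h ['.']).toNat) := by
  constructor
  · intro hc
    simp only [Bool.and_eq_true, Bool.not_eq_true'] at hc
    obtain ⟨⟨⟨hsw, hew⟩, hin⟩, hpre⟩ := hc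
    rw [PySem.Chars.startswith_iff] at hsw
    obtain ⟨t, rfl⟩ := hsw
    rw [PySem.Chars.endswith_iff] at hew
    simp only [List.cons_append, List.nil_append, List.tail_cons] at hew hpre ⊢
    obtain ⟨p, rfl⟩ := hew
    have hfind : 0 ≤ PySem.Chars.find (p ++ '.' :: t) ['.'] := by
      rw [PySem.Chars.find_nonneg_iff]
      exact (PySem.Chars.isIn_iff_infix _ _).mp hin
    refine ⟨hfind, ?_⟩
    have hb : (-((('*' :: '.' :: t : List Char)).length : Int) + 1) = -((t.length + 1 : Nat) : Int) := by
      simp only [List.length_cons]; push_cast; ring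
    rw [hb, PySem.List.slice_to_neg_natCast _ _ (Nat.succ_pos _)] at hpre
    have hlen : (p ++ '.' :: t).length - (t.length + 1) = p.length := by
      simp only [List.length_append, List.length_cons]; omega
    rw [hlen, List.take_left] at hpre
    have hnp : '.' ∉ p := by
      rw [PySem.Chars.isIn_eq_false_iff] at hpre
      exact fun hm => hpre ((pv_single_infix _ _).mpr hm)
    obtain ⟨hp1, hmin⟩ := PySem.Chars.find_spec hfind
    set d := (PySem.Chars.find (p ++ '.' :: t) ['.']).toNat with hd
    have hgp : (p ++ '.' :: t)[p.length]? = some '.' := by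
      rw [List.getElem?_append_right (le_refl _)]; simp
    have hdle : d ≤ p.length := by
      by_contra hlt
      push Not at hlt
      exact hmin p.length hlt ((pv_single_prefix_drop _ _ _).mpr hgp)
    have hdge : ¬ d < p.length := by
      intro hlt
      have hgd := (pv_single_prefix_drop _ _ _).mp hp1
      rw [List.getElem?_append_left hlt] at hgd
      exact hnp (List.mem_of_getElem? hgd)
    have hdeq : d = p.length := by omega
    rw [hdeq, List.drop_left]
  · rintro ⟨hfind, rfl⟩
    obtain ⟨hp1, hmin⟩ := PySem.Chars.find_spec hfind
    set d := (PySem.Chars.find h ['.']).toNat with hd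
    have hdl : d < h.length := by
      have hl := hp1.length_le
      simp only [List.length_cons, List.length_drop] at hl
      omega
    have hget : h[d]? = some '.' := (pv_single_prefix_drop _ _ _).mp hp1
    have hdrop : h.drop d = '.' :: h.drop (d + 1) := by
      rw [List.drop_eq_getElem_cons hdl]
      rw [List.getElem?_eq_getElem hdl] at hget
      simp only [Option.some.injEq] at hget
      rw [hget]
    simp only [Bool.and_eq_true, Bool.not_eq_true']
    refine ⟨⟨⟨?_, ?_⟩, ?_⟩, ?_⟩
    · rw [PySem.Chars.startswith_iff, hdrop]
      exact ⟨_, rfl⟩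
    · rw [PySem.Chars.endswith_iff, List.tail_cons]
      exact List.drop_suffix d h
    · rw [PySem.Chars.isIn_iff_infix]
      exact (PySem.Chars.find_nonneg_iff _ _).mp hfind
    · have hb : (-((('*' :: h.drop d : List Char)).length : Int) + 1) = -((h.length - d : Nat) : Int) := by
        simp only [List.length_cons, List.length_drop]
        push_cast [Nat.cast_sub hdl.le]
        ring
      rw [hb, PySem.List.slice_to_neg_natCast _ _ (by omega)]
      have he : h.length - (h.length - d) = d := by omega
      rw [he, PySem.Chars.isIn_eq_false_iff]
      intro hinf
      have hm := (pv_single_infix _ _).mp hinf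
      obtain ⟨i, hi, hieq⟩ := List.mem_iff_getElem.mp hm
      have hi' : i < d := by
        simp only [List.length_take] at hi
        omega
      refine hmin i hi' ?_
      rw [pv_single_prefix_drop]
      rw [List.getElem_take] at hieq
      rw [List.getElem?_eq_getElem (by omega)]
      rw [hieq]

-- A's loop is an `any` over the list
theorem pv_loop_eq (host : String) (l : List String) :
    sanLoopA host l = l.any (fun san =>
      san == host ||
      (PySem.Str.startswith san "*." && PySem.Str.endswith host (PySem.Str.slice san (some 1) none)
        && PySem.Str.isIn "." host
        && !(PySem.Str.isIn "." (PySem.Str.slice host none (some (-(PySem.Str.len san) + 1)))))) := by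
  induction l with
  | nil => rfl
  | cons san rest ih =>
    cases h1 : (san == host) <;>
    cases h2 : (PySem.Str.startswith san "*." && PySem.Str.endswith host (PySem.Str.slice san (some 1) none) && PySem.Str.isIn "." host) <;>
    cases h3 : (!(PySem.Str.isIn "." (PySem.Str.slice host none (some (-(PySem.Str.len san) + 1))))) <;>
    simp only [sanLoopA, List.any_cons, h1, h2, h3, if_true,
      Bool.false_or, Bool.true_or, Bool.and_false, Bool.and_true,
      Bool.or_true, Bool.or_false, ih] <;> rfl

-- ===== VERDICT (by name: the statement is the Claim_ definition above) =====
-- the per-SAN test of A, phrased at String level, characterised via pv_wc_iff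
theorem pv_key (h' san : String) :
    ((san == h' ||
      (PySem.Str.startswith san "*." && PySem.Str.endswith h' (PySem.Str.slice san (some 1) none)
        && PySem.Str.isIn "." h'
        && !(PySem.Str.isIn "." (PySem.Str.slice h' none (some (-(PySem.Str.len san) + 1)))))) = true)
    ↔ (san = h' ∨ (0 ≤ PySem.Chars.find h'.toList ['.'] ∧
        san.toList = '*' :: h'.toList.drop (PySem.Chars.find h'.toList ['.']).toNat)) := by
  rw [Bool.or_eq_true, beq_iff_eq]
  apply or_congr Iff.rfl
  have e2 : PySem.Str.endswith h' (PySem.Str.slice san (some 1) none)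
      = PySem.Chars.endswith h'.toList san.toList.tail := by
    simp [PySem.Str.endswith, PySem.Str.slice, PySem.Chars.slice_eq_listSlice,
      PySem.List.slice_from_one]
  have e4 : PySem.Str.isIn "." (PySem.Str.slice h' none (some (-(PySem.Str.len san) + 1)))
      = PySem.Chars.isIn ['.'] (PySem.List.slice h'.toList none (some (-(san.toList.length : Int) + 1))) := by
    simp [PySem.Str.isIn, PySem.Str.slice, PySem.Chars.slice_eq_listSlice]
  rw [show PySem.Str.startswith san "*." = PySem.Chars.startswith san.toList ['*', '.'] from rfl,
    e2, show PySem.Str.isIn "." h' = PySem.Chars.isIn ['.'] h'.toList from rfl, e4,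
    pv_wc_iff h'.toList san.toList]

-- ===== VERDICT (by name: the statement is the Claim_ definition above) =====
theorem san_matches_py_spec : Claim_equal_san_matches_py := by
  unfold Claim_equal_san_matches_py
  intro san_dns host _
  unfold Spec_san_matches_py san_matches_py san_matches_py_alt
  rw [pv_loop_eq]
  rw [Bool.eq_iff_iff]
  set h' := PySem.Str.lower host with hh
  simp only [PySem.Set.isdisjoint, Bool.not_not, List.any_eq_true, pv_key]
  by_cases hdot : PySem.Str.find h' "." < 0
  · have hneg : ¬ (0 ≤ PySem.Chars.find h'.toList ['.']) := by
      rw [show PySem.Str.find h' "." = PySem.Chars.find h'.toList ['.'] from rfl] at hdot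
      omega
    simp only [if_pos hdot]
    constructor
    · rintro ⟨san, hmem, hsan⟩
      rcases hsan with rfl | ⟨hge0, _⟩
      · exact ⟨h', by simp [PySem.Set.mem_ofList], List.contains_iff_mem.mpr hmem⟩
      · exact absurd hge0 hneg
    · rintro ⟨x, hx, hc⟩
      rw [PySem.Set.mem_ofList] at hx
      simp only [List.mem_singleton] at hx
      subst hx
      exact ⟨h', List.contains_iff_mem.mp hc, Or.inl rfl⟩
  · have hge : 0 ≤ PySem.Chars.find h'.toList ['.'] := by
      rw [show PySem.Str.find h' "." = PySem.Chars.find h'.toList ['.'] from rfl] at hdot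
      omega
    have hwc : ("*" ++ PySem.Str.slice h' (some (PySem.Str.find h' ".")) none).toList
        = '*' :: h'.toList.drop (PySem.Chars.find h'.toList ['.']).toNat := by
      rw [String.toList_append,
        show PySem.Str.find h' "." = PySem.Chars.find h'.toList ['.'] from rfl]
      simp only [PySem.Str.slice, String.toList_ofList, PySem.Chars.slice_eq_listSlice]
      rw [PySem.List.slice_from h'.toList hge]
      rfl
    simp only [if_neg hdot]
    constructor
    · rintro ⟨san, hmem, hsan⟩
      rcases hsan with rfl | ⟨-, hlist⟩
      · exact ⟨h', by simp [PySem.Set.mem_ofList], List.contains_iff_mem.mpr hmem⟩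
      · refine ⟨san, ?_, List.contains_iff_mem.mpr hmem⟩
        rw [PySem.Set.mem_ofList]
        right
        refine List.mem_singleton.mpr ?_
        rw [← String.toList_inj, hwc, hlist]
    · rintro ⟨x, hx, hc⟩
      rw [PySem.Set.mem_ofList] at hx
      refine ⟨x, List.contains_iff_mem.mp hc, ?_⟩
      rcases List.mem_cons.mp hx with rfl | hx'
      · exact Or.inl rfl
      · rw [List.mem_singleton] at hx'
        subst hx'
        right
        exact ⟨hge, by rw [hwc]⟩
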